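-- pv_equiv track=rewrite | github.com/souravsarker2015/pactice_problems | ns4/16 unsorted_missing.py | missing_elements
-- ===== SOURCE A (Python) =====
-- def missing_elements(arr, n):
--     missing = dict()
--     for i in range(len(arr)):
--         missing[arr[i]] = 1
--
--     minm = min(arr)
--     maxm = max(arr)
--     count = 0
--
--     for i in range(minm +1, maxm):
--         if i not in missing:
--             count += 1
--         if count==n:
--             return i
-- ===== SOURCE B (Python) =====
-- def missing_elements(arr, n):
--     if n <= 0:
--         return None
--     vals = sorted(set(arr))
--     count = 0
--     for a, b in zip(vals, vals[1:]):
--         gap = b - a - 1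
--         if count + gap >= n:
--             return a + (n - count)
--         count += gap
--     return None
-- ===== Notes on version B (the rewrite author's own statement) =====
-- stated objective: alternative
-- what changed: Instead of hashing all elements and scanning every integer from min(arr)+1 to max(arr)-1 counting misses, B sorts the distinct values once and walks the adjacent gaps, computing the n-th missing element by arithmetic inside the first gap where the running miss count reaches n (O(m log m) in the array size, independent of the value range; measured comparable on dense random inputs).
-- intended difference: On n = 0 with min(arr)+1 present in arr and min(arr)+1 < max(arr), A returns min(arr)+1 — an element that is present, not missing (its count==n test fires before any miss) — while B returns None, the intended answer since there is no 0-th missing element. — e.g. on missing_elements([1, 2, 4], 0): A returns some 2, B returns none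
import Mathlib
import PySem

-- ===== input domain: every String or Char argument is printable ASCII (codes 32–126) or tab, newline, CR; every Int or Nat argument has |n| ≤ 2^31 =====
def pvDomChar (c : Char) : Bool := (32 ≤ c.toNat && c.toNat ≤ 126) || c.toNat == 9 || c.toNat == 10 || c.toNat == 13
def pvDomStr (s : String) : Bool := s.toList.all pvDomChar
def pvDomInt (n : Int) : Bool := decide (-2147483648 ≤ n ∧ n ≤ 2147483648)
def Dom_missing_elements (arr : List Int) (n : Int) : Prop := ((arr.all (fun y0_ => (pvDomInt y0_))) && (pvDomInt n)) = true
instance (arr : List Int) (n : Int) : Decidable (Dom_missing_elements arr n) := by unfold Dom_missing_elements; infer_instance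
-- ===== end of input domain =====

-- B replaces A's scan of every integer between min(arr) and max(arr) by a sort of the
-- distinct values and a per-gap count, locating the n-th missing element directly.
-- Equivalence is about the return value; neither program mutates its argument.

-- ===== PORT A =====
-- the second 'for' loop of A, with its early return; iterated lazily like Python's
-- range object (the remaining range length is the structural fuel, i the running value)
def meLoop (missing : PySem.Dict Int Int) (n : Int) : Nat → Int → Int → Option Int
  | 0, _, _ => none
  | fuel + 1, i, count =>
    let count' := if missing.get? i = none then count + 1 else count
    if count' = n then some i else meLoop missing n fuel (i + 1) count'

def missing_elements (arr : List Int) (n : Int) : Option Int :=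
  let missing : PySem.Dict Int Int :=
    (PySem.List.pyRange 0 (PySem.List.len arr)).foldl
      (fun d i => d.insert (PySem.List.pyGetD arr i 0) 1) PySem.Dict.empty
  match PySem.List.min? arr (fun x => x), PySem.List.max? arr (fun x => x) with
  | some minm, some maxm => meLoop missing n (maxm - (minm + 1)).toNat (minm + 1) 0
  | _, _ => none  -- unreachable under Pre_ (Python's min/max raise on an empty list)

-- ===== PORT B =====
-- B's 'for a, b in zip(vals, vals[1:])' loop, with its early return
def altLoop (n : Int) : List (Int × Int) → Int → Option Int
  | [], _ => none
  | (a, b) :: rest, count =>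
    let gap := b - a - 1
    if count + gap ≥ n then some (a + (n - count))
    else altLoop n rest (count + gap)

def missing_elements_alt (arr : List Int) (n : Int) : Option Int :=
  if n ≤ 0 then none
  else
    let vals : List Int := PySem.List.sorted (PySem.Set.ofList arr) (fun x => x)
    altLoop n (vals.zip (PySem.List.slice vals (some 1) none)) 0

-- ===== PRECONDITION & SPEC =====
-- Pre_ excludes only the empty list, on which Python's min() raises ValueError.
def Pre_missing_elements (arr : List Int) (n : Int) : Prop := arr ≠ []
instance (arr : List Int) (n : Int) : Decidable (Pre_missing_elements arr n) := by
  unfold Pre_missing_elements; infer_instance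

def pvWitness_missing_elements : List Int × Int := ([1, 4, 2, 8], 2)

-- On n = 0 with min(arr)+1 present in arr and min(arr)+1 < max(arr), A returns min(arr)+1 —
-- an element that is PRESENT, not missing (the count==n test fires before any miss) — while B
-- returns None, the intended answer since there is no 0-th missing element.
def D_missing_elements (arr : List Int) (n : Int) : Prop :=
  n = 0 ∧ arr ≠ [] ∧ arr.foldl min (arr.headD 0) + 1 ∈ arr ∧
    arr.foldl min (arr.headD 0) + 1 < arr.foldl max (arr.headD 0)
instance (arr : List Int) (n : Int) : Decidable (D_missing_elements arr n) := by
  unfold D_missing_elements; infer_instance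

def Spec_missing_elements (arr : List Int) (n : Int) (out : Option Int) : Prop :=
  ¬ D_missing_elements arr n → out = missing_elements_alt arr n
instance (arr : List Int) (n : Int) (out : Option Int) : Decidable (Spec_missing_elements arr n out) := by
  unfold Spec_missing_elements; infer_instance

def pvDiffWitness_missing_elements : List Int × Int := ([1, 2, 4], 0)
def pvDiffWitnessOut_missing_elements : (Option Int) × (Option Int) := (some 2, none)

-- ===== CLAIM (what is proved, stated in full; the proofs are below) =====
def Claim_unchanged_missing_elements : Prop := ∀ (arr : List Int) (n : Int), Dom_missing_elements arr n → Pre_missing_elements arr n → Spec_missing_elements arr n (missing_elements arr n)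
def Claim_changed_missing_elements : Prop := Dom_missing_elements (pvDiffWitness_missing_elements.1) (pvDiffWitness_missing_elements.2) ∧ Pre_missing_elements (pvDiffWitness_missing_elements.1) (pvDiffWitness_missing_elements.2) ∧ D_missing_elements (pvDiffWitness_missing_elements.1) (pvDiffWitness_missing_elements.2) ∧ missing_elements (pvDiffWitness_missing_elements.1) (pvDiffWitness_missing_elements.2) = pvDiffWitnessOut_missing_elements.1 ∧ missing_elements_alt (pvDiffWitness_missing_elements.1) (pvDiffWitness_missing_elements.2) = pvDiffWitnessOut_missing_elements.2 ∧ pvDiffWitnessOut_missing_elements.1 ≠ pvDiffWitnessOut_missing_elements.2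
def Claim_exact_missing_elements : Prop := ∀ (arr : List Int) (n : Int), Dom_missing_elements arr n → Pre_missing_elements arr n → D_missing_elements arr n → missing_elements arr n ≠ missing_elements_alt arr n

-- ===== LEMMAS AND PROOFS =====

-- list form of A's loop (the proofs reason over the materialised range)
def meLoopL (missing : PySem.Dict Int Int) (n : Int) : List Int → Int → Option Int
  | [], _ => none
  | i :: rest, count =>
    let count' := if missing.get? i = none then count + 1 else count
    if count' = n then some i else meLoopL missing n rest count'

lemma meLoop_eq_meLoopL (d : PySem.Dict Int Int) (n : Int) :
    ∀ (fuel : Nat) (i count : Int),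
      meLoop d n fuel i count = meLoopL d n (PySem.List.pyRange i (i + fuel)) count := by
  intro fuel
  induction fuel with
  | zero =>
    intro i count
    simp [meLoop, PySem.List.pyRange_one, meLoopL]
  | succ f ih =>
    intro i count
    rw [show ((f + 1 : Nat) : Int) = (f : Int) + 1 by push_cast; ring,
      PySem.List.pyRange_one_cons (by omega : i < i + ((f : Int) + 1)),
      show i + ((f : Int) + 1) = (i + 1) + (f : Int) by ring]
    simp only [meLoop, meLoopL, ih (i + 1)]

lemma pyRange_trim (a b : Int) :
    PySem.List.pyRange a (a + ((b - a).toNat : Int)) = PySem.List.pyRange a b := by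
  rw [PySem.List.pyRange_one, PySem.List.pyRange_one]
  congr 2
  omega

-- the dict A builds answers exactly "is the key an element of arr"
lemma dict_fold_get (xs : List Int) (d : PySem.Dict Int Int) (k : Int) :
    (xs.foldl (fun d x => d.insert x 1) d).get? k = none ↔ d.get? k = none ∧ k ∉ xs := by
  induction xs generalizing d with
  | nil => simp
  | cons x t ih =>
    simp only [List.foldl_cons, ih, PySem.Dict.get?_insert, List.mem_cons]
    by_cases h : k = x <;> simp [h]

lemma meLoopL_gt (d : PySem.Dict Int Int) (n : Int) :
    ∀ (L : List Int) (count : Int), n < count → meLoopL d n L count = none := by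
  intro L
  induction L with
  | nil => intro count _; rfl
  | cons i t ih =>
    intro count h
    simp only [meLoopL]
    split_ifs with h1 h2 h2 <;> first | omega | exact ih _ (by omega)

lemma meLoopL_spec (d : PySem.Dict Int Int) (n : Int) :
    ∀ (L : List Int) (count : Int), count < n →
      meLoopL d n L count =
        (L.filter (fun i => decide (d.get? i = none)))[(n - count - 1).toNat]? := by
  intro L
  induction L with
  | nil => intro count _; simp [meLoopL]
  | cons i t ih =>
    intro count h
    simp only [meLoopL]
    by_cases hm : d.get? i = none
    · by_cases he : count + 1 = n
      · have : (n - count - 1).toNat = 0 := by omega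
        simp [hm, he, this]
      · have h1 : ¬ (count + 1 = n) := he
        have h2 : count + 1 < n := by omega
        have ht : (n - count - 1).toNat = (n - (count + 1) - 1).toNat + 1 := by omega
        simp [hm, h1, ht, ih _ h2]
    · have h1 : ¬ (count = n) := by omega
      simp [hm, h1, ih _ h]

lemma altLoop_spec (n : Int) :
    ∀ (ps : List (Int × Int)) (count : Int), (∀ p ∈ ps, p.1 < p.2) → count < n →
      altLoop n ps count =
        (ps.flatMap (fun p => PySem.List.pyRange (p.1 + 1) p.2))[(n - count - 1).toNat]? := by
  intro ps
  induction ps with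
  | nil => intro count _ _; simp [altLoop]
  | cons p t ih =>
    intro count hlt h
    obtain ⟨a, b⟩ := p
    have hab : a < b := hlt (a, b) (by simp)
    have hlen : (PySem.List.pyRange (a + 1) b).length = (b - a - 1).toNat := by
      simp [PySem.List.length_pyRange_one]; omega
    simp only [altLoop, List.flatMap_cons]
    by_cases hc : count + (b - a - 1) ≥ n
    · have hk : (n - count - 1).toNat < (PySem.List.pyRange (a + 1) b).length := by
        rw [hlen]; omega
      rw [if_pos hc, List.getElem?_append, if_pos hk, PySem.List.getElem?_pyRange_one,
        if_pos (by omega : (n - count - 1).toNat < (b - (a + 1)).toNat)]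
      congr 1
      omega
    · have hge : (PySem.List.pyRange (a + 1) b).length ≤ (n - count - 1).toNat := by
        rw [hlen]; omega
      rw [if_neg hc, List.getElem?_append_right hge,
        ih _ (fun q hq => hlt q (by simp [hq])) (by omega)]
      congr 1
      rw [hlen]; omega

lemma zip_tail_lt :
    ∀ (l : List Int), l.Pairwise (· < ·) → ∀ p ∈ l.zip (l.drop 1), p.1 < p.2 := by
  intro l
  induction l with
  | nil => intro _ p hp; simp at hp
  | cons a t ih =>
    intro hp p hmem
    cases t with
    | nil => simp at hmem
    | cons b r =>
      simp only [List.drop_one, List.tail_cons, List.zip_cons_cons, List.mem_cons] at hmem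
      rcases hmem with h | h
      · subst h; exact List.rel_of_pairwise_cons hp (by simp)
      · exact ih hp.tail p (by simpa [List.drop_one] using h)

lemma gap_chain :
    ∀ (rest : List Int) (v : Int), (v :: rest).Pairwise (· < ·) →
      ((PySem.List.pyRange (v + 1) ((v :: rest).getLast (List.cons_ne_nil v rest))).filter
          (fun i => !decide (i ∈ v :: rest)))
        = ((v :: rest).zip rest).flatMap (fun p => PySem.List.pyRange (p.1 + 1) p.2) := by
  intro rest
  induction rest with
  | nil => intro v _; simp
  | cons b r ih =>
    intro v hp
    have hvb : v < b := List.rel_of_pairwise_cons hp (by simp)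
    have hbr : ∀ x ∈ r, b < x := fun x hx => List.rel_of_pairwise_cons hp.tail hx
    have hL : (v :: b :: r).getLast (List.cons_ne_nil v (b :: r)) =
        (b :: r).getLast (List.cons_ne_nil b r) := List.getLast_cons _
    have hbL : b ≤ (b :: r).getLast (List.cons_ne_nil b r) := by
      have := List.getLast_mem (List.cons_ne_nil b r)
      rcases List.mem_cons.mp this with h | h
      · omega
      · exact le_of_lt (hbr _ h)
    set L := (b :: r).getLast (List.cons_ne_nil b r) with hLdef
    rw [hL, PySem.List.pyRange_one_append (v + 1) b L (by omega) hbL, List.filter_append]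
    have hfirst : (PySem.List.pyRange (v + 1) b).filter (fun i => !decide (i ∈ v :: b :: r))
        = PySem.List.pyRange (v + 1) b := by
      apply List.filter_eq_self.mpr
      intro i hi
      rw [PySem.List.mem_pyRange_one] at hi
      have h1 : i ≠ v := by omega
      have h2 : i ≠ b := by omega
      have h3 : i ∉ r := fun hm => by have := hbr i hm; omega
      simp [h1, h2, h3]
    rw [hfirst]
    simp only [List.zip_cons_cons, List.flatMap_cons]
    congr 1
    cases r with
    | nil =>
      rw [show L = b from rfl]
      simp [PySem.List.pyRange_one]
    | cons c s =>
      have hbLlt : b < L := by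
        have : L = (c :: s).getLast (List.cons_ne_nil c s) := List.getLast_cons _
        have hm := List.getLast_mem (List.cons_ne_nil c s)
        rw [← this] at hm
        exact hbr _ hm
      rw [PySem.List.pyRange_one_cons hbLlt, List.filter_cons]
      have hbmem : (!decide (b ∈ v :: b :: c :: s)) = false := by simp
      rw [hbmem]
      rw [if_neg Bool.false_ne_true]
      have hcongr : (PySem.List.pyRange (b + 1) L).filter (fun i => !decide (i ∈ v :: b :: c :: s))
          = (PySem.List.pyRange (b + 1) L).filter (fun i => !decide (i ∈ b :: c :: s)) := by
        apply List.filter_congr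
        intro i hi
        rw [PySem.List.mem_pyRange_one] at hi
        have : i ≠ v := by omega
        simp [this]
      rw [hcongr, hLdef]
      exact ih b hp.tail

-- the head of a strictly sorted list with the same members as arr is min(arr), the last is max(arr)
lemma sorted_head_ge (l : List Int) (hp : l.Pairwise (· < ·)) (h : l ≠ []) :
    ∀ x ∈ l, l.head h ≤ x := by
  cases l with
  | nil => exact absurd rfl h
  | cons a t =>
    intro x hx
    rcases List.mem_cons.mp hx with h1 | h1
    · simp [h1]
    · exact le_of_lt (List.rel_of_pairwise_cons hp h1)

lemma sorted_getLast_le (l : List Int) (hp : l.Pairwise (· < ·)) (h : l ≠ []) :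
    ∀ x ∈ l, x ≤ l.getLast h := by
  induction l with
  | nil => exact absurd rfl h
  | cons a t ih =>
    intro x hx
    cases t with
    | nil => simp at hx; simp [hx]
    | cons b r =>
      rw [List.getLast_cons (List.cons_ne_nil b r)]
      rcases List.mem_cons.mp hx with h1 | h1
      · subst h1
        have := List.getLast_mem (List.cons_ne_nil b r)
        exact le_of_lt (List.rel_of_pairwise_cons hp this)
      · exact ih hp.tail (List.cons_ne_nil b r) x h1

-- common setup facts, packaged for the two verdict theorems
lemma vals_facts (arr : List Int) (h : arr ≠ []) :
    (PySem.List.sorted (PySem.Set.ofList arr) (fun x => x)).Pairwise (· < ·) ∧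
    (∀ i, i ∈ PySem.List.sorted (PySem.Set.ofList arr) (fun x => x) ↔ i ∈ arr) ∧
    PySem.List.sorted (PySem.Set.ofList arr) (fun x => x) ≠ [] := by
  set vals := PySem.List.sorted (PySem.Set.ofList arr) (fun x => x) with hv
  have hperm : vals.Perm (PySem.Set.ofList arr) := PySem.List.sorted_perm _ _ _
  have hmem : ∀ i, i ∈ vals ↔ i ∈ arr := fun i =>
    hperm.mem_iff.trans (PySem.Set.mem_ofList arr i)
  have hnodup : vals.Nodup := hperm.nodup_iff.mpr (PySem.Set.nodup_ofList arr)
  have hle : vals.Pairwise (· ≤ ·) := PySem.List.sorted_pairwise _ _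
  have hlt : vals.Pairwise (· < ·) :=
    (hle.and hnodup).imp fun hab => lt_of_le_of_ne hab.1 hab.2
  refine ⟨hlt, hmem, ?_⟩
  intro hnil
  obtain ⟨x, t, rfl⟩ := List.exists_cons_of_ne_nil h
  have := (hmem x).mpr (by simp)
  simp [hnil] at this

lemma dget_iff (arr : List Int) (k : Int) :
    (arr.foldl (fun d x => d.insert x 1) (PySem.Dict.empty : PySem.Dict Int Int)).get? k = none
      ↔ k ∉ arr := by
  rw [dict_fold_get]
  simp [PySem.Dict.get?_empty]

lemma head_eq_min (x : Int) (t : List Int) (v : Int) (rest : List Int)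
    (hlt : (v :: rest).Pairwise (· < ·)) (hmem : ∀ i, i ∈ v :: rest ↔ i ∈ x :: t) :
    v = t.foldl min x := by
  have h1 : t.foldl min x ≤ v := by
    have hvmem : v ∈ x :: t := (hmem v).mp (by simp)
    rcases List.mem_cons.mp hvmem with h | h
    · rw [h]; exact (PySem.List.foldl_min_le t x).1
    · exact (PySem.List.foldl_min_le t x).2 v h
  have h2 : v ≤ t.foldl min x := by
    have hmmem : t.foldl min x ∈ x :: t := by
      rcases PySem.List.foldl_min_mem t x with h | h
      · rw [h]; simp
      · simp [h]
    exact sorted_head_ge (v :: rest) hlt (List.cons_ne_nil v rest) _ ((hmem _).mpr hmmem)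
  omega

lemma getLast_eq_max (x : Int) (t : List Int) (v : Int) (rest : List Int)
    (hlt : (v :: rest).Pairwise (· < ·)) (hmem : ∀ i, i ∈ v :: rest ↔ i ∈ x :: t) :
    (v :: rest).getLast (List.cons_ne_nil v rest) = t.foldl max x := by
  have h1 : (v :: rest).getLast (List.cons_ne_nil v rest) ≤ t.foldl max x := by
    have : (v :: rest).getLast (List.cons_ne_nil v rest) ∈ x :: t :=
      (hmem _).mp (List.getLast_mem _)
    rcases List.mem_cons.mp this with h | h
    · rw [h]; exact (PySem.List.le_foldl_max t x).1
    · exact (PySem.List.le_foldl_max t x).2 _ h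
  have h2 : t.foldl max x ≤ (v :: rest).getLast (List.cons_ne_nil v rest) := by
    have hmmem : t.foldl max x ∈ x :: t := by
      rcases PySem.List.foldl_max_mem t x with h | h
      · rw [h]; simp
      · simp [h]
    exact sorted_getLast_le (v :: rest) hlt (List.cons_ne_nil v rest) _ ((hmem _).mpr hmmem)
  omega

-- ===== VERDICT (by name: the statement is the Claim_ definition above) =====
theorem missing_elements_spec : Claim_unchanged_missing_elements := by
  intro arr n _ hpre
  unfold Spec_missing_elements
  intro hnd
  obtain ⟨x, t, rfl⟩ := List.exists_cons_of_ne_nil hpre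
  obtain ⟨hlt, hmem, hvne⟩ := vals_facts (x :: t) hpre
  obtain ⟨v, rest, hvr⟩ := List.exists_cons_of_ne_nil hvne
  rw [hvr] at hlt hmem
  have hhead : v = t.foldl min x := head_eq_min x t v rest hlt hmem
  have hlast : (v :: rest).getLast (List.cons_ne_nil v rest) = t.foldl max x :=
    getLast_eq_max x t v rest hlt hmem
  simp only [missing_elements, PySem.List.min?_id_cons, PySem.List.max?_id_cons]
  have hdict : (PySem.List.pyRange 0 (PySem.List.len (x :: t))).foldl
      (fun d i => d.insert (PySem.List.pyGetD (x :: t) i 0) 1)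
      (PySem.Dict.empty : PySem.Dict Int Int)
      = (x :: t).foldl (fun d y => d.insert y 1) PySem.Dict.empty := by
    simpa using PySem.List.foldl_pyRange_pyGetD (x :: t) 0
      (fun (d : PySem.Dict Int Int) (y : Int) => d.insert y 1) PySem.Dict.empty (le_refl 0)
  rw [hdict]
  set d := (x :: t).foldl (fun d y => d.insert y 1) (PySem.Dict.empty : PySem.Dict Int Int)
    with hd
  rw [meLoop_eq_meLoopL, pyRange_trim]
  by_cases hn : n ≤ 0
  · -- B returns none; show A's loop also yields none (outside D_)
    rw [show missing_elements_alt (x :: t) n = none by simp [missing_elements_alt, hn]]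
    by_cases hn0 : n = 0
    · subst hn0
      by_cases hr : t.foldl min x + 1 < t.foldl max x
      · have hnin : t.foldl min x + 1 ∉ x :: t := by
          intro hin
          apply hnd
          refine ⟨rfl, hpre, ?_, ?_⟩
          · simpa [min_self] using hin
          · simpa [min_self, max_self] using hr
        have hget : d.get? (t.foldl min x + 1) = none := by
          rw [hd, dget_iff]; exact hnin
        rw [PySem.List.pyRange_one_cons hr]
        simp only [meLoopL, hget]
        norm_num
        exact meLoopL_gt d 0 _ 1 (by omega)
      · rw [show PySem.List.pyRange (t.foldl min x + 1) (t.foldl max x) = [] by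
          simp [PySem.List.pyRange_one, show (t.foldl max x - (t.foldl min x + 1)).toNat = 0
            by omega]]
        rfl
    · exact meLoopL_gt d n _ 0 (by omega)
  · -- n ≥ 1: both sides are the (n-1)-th element of the list of missing values
    have h0n : (0 : Int) < n := by omega
    have hzlt : ∀ p ∈ (v :: rest).zip rest, p.1 < p.2 := fun p hp =>
      zip_tail_lt (v :: rest) hlt p (by simpa using hp)
    have halt : missing_elements_alt (x :: t) n =
        (((v :: rest).zip rest).flatMap
          (fun p => PySem.List.pyRange (p.1 + 1) p.2))[(n - 0 - 1).toNat]? := by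
      simp only [missing_elements_alt, if_neg hn]
      rw [PySem.List.slice_from _ (by omega : (0:Int) ≤ 1), hvr]
      exact altLoop_spec n ((v :: rest).zip rest) 0 hzlt h0n
    rw [meLoopL_spec d n _ 0 h0n, halt]
    congr 1
    rw [show t.foldl min x = v from hhead.symm, ← hlast, ← gap_chain rest v hlt]
    refine List.filter_congr fun i _ => ?_
    have hiff : (d.get? i = none) ↔ ¬ (i ∈ v :: rest) := by
      rw [hd, dget_iff]
      exact (not_congr (hmem i)).symm
    simp [hiff]

theorem missing_elements_changed : Claim_changed_missing_elements := by
  unfold Claim_changed_missing_elements; decide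

theorem missing_elements_tight : Claim_exact_missing_elements := by
  intro arr n _ hpre hD
  obtain ⟨hn0, _, hin, hr⟩ := hD
  obtain ⟨x, t, rfl⟩ := List.exists_cons_of_ne_nil hpre
  subst hn0
  simp only [List.headD_cons, List.foldl_cons, min_self, max_self] at hin hr
  simp only [missing_elements, PySem.List.min?_id_cons, PySem.List.max?_id_cons]
  have hdict : (PySem.List.pyRange 0 (PySem.List.len (x :: t))).foldl
      (fun d i => d.insert (PySem.List.pyGetD (x :: t) i 0) 1)
      (PySem.Dict.empty : PySem.Dict Int Int)
      = (x :: t).foldl (fun d y => d.insert y 1) PySem.Dict.empty := by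
    simpa using PySem.List.foldl_pyRange_pyGetD (x :: t) 0
      (fun (d : PySem.Dict Int Int) (y : Int) => d.insert y 1) PySem.Dict.empty (le_refl 0)
  rw [hdict]
  set d := (x :: t).foldl (fun d y => d.insert y 1) (PySem.Dict.empty : PySem.Dict Int Int)
    with hd
  have hget : ¬ (d.get? (t.foldl min x + 1) = none) := by
    rw [hd, dget_iff]; exact not_not_intro hin
  rw [meLoop_eq_meLoopL, pyRange_trim, PySem.List.pyRange_one_cons hr]
  simp [meLoopL, hget, missing_elements_alt]
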